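-- pv_equiv track=rewrite | github.com/aupereira/DumPy | dumpy/linalg/matrix_core.py | vec_mat_mul
-- ===== SOURCE A (Python) =====
-- def vec_mat_mul(A, B):
--     output = []
--     for i in range(len(B[0])):
--         sum = 0
--         for j in range(len(A)):
--             sum += A[j] * B[j][i]
--         output.append(sum)
--     return output
-- ===== SOURCE B (Python) =====
-- def vec_mat_mul(A, B):
--     output = [0] * len(B[0])
--     for a, row in zip(A, B):
--         for i in range(len(output)):
--             output[i] += a * row[i]
--     return output
-- ===== Notes on version B (the rewrite author's own statement) =====
-- stated objective: alternative
-- what changed: Replaces the per-column dot-product nesting (columns outer, rows inner) by a SAXPY-style accumulation: a running output vector of len(B[0]) zeros is kept and each row of B, scaled by the matching entry of A, is added into it in one pass over zip(A, B).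
import Mathlib
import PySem

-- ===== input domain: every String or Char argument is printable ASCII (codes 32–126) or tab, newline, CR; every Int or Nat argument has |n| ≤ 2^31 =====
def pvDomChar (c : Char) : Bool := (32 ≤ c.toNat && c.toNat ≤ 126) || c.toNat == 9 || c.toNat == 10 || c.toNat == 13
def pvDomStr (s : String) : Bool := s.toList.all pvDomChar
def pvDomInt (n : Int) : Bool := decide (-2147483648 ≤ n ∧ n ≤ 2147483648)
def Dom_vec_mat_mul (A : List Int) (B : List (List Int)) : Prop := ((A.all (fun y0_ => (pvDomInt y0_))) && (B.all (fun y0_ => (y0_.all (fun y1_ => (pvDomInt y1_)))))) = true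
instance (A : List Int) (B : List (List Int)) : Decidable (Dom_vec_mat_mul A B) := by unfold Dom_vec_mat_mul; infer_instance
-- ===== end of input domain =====

-- B replaces A's per-column dot products by a SAXPY-style running output vector updated row by row; same cost, different traversal.


-- ===== PORT A =====
-- for i in range(len(B[0])): sum = 0; for j in range(len(A)): sum += A[j]*B[j][i]; output.append(sum)
-- (indices i, j are always nonnegative and, under Pre_, in range, so getD is exact there)
def vec_mat_mul (A : List Int) (B : List (List Int)) : List Int :=
  (List.range (B.headD []).length).foldl
    (fun output i =>
      output ++ [(List.range A.length).foldl
        (fun s j => s + A.getD j 0 * (B.getD j []).getD i 0) 0])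
    []

-- ===== PORT B =====
-- output = [0]*len(B[0]); for a, row in zip(A, B): for i in range(len(output)): output[i] += a*row[i]
def vec_mat_mul_alt (A : List Int) (B : List (List Int)) : List Int :=
  (A.zip B).foldl
    (fun output p =>
      (List.range output.length).foldl
        (fun o i => o.set i (o.getD i 0 + p.1 * p.2.getD i 0)) output)
    (List.replicate (B.headD []).length 0)

-- ===== PRECONDITION & SPEC =====
-- Pre_ holds exactly where the Python A returns: B nonempty (len(B[0]) is read), and unless
-- the first row is empty (empty output, no indexing) every B[j] with j < len(A) must exist
-- and be at least len(B[0]) long; outside this A raises IndexError.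
def Pre_vec_mat_mul (A : List Int) (B : List (List Int)) : Prop :=
  B ≠ [] ∧ ((B.headD []).length = 0 ∨
    (A.length ≤ B.length ∧
      ∀ j < A.length, (B.headD []).length ≤ (B.getD j []).length))
instance (A : List Int) (B : List (List Int)) : Decidable (Pre_vec_mat_mul A B) := by unfold Pre_vec_mat_mul; infer_instance
def pvWitness_vec_mat_mul : List Int × List (List Int) := ([1, 2], [[1, 0], [3, 1]])
def Spec_vec_mat_mul (A : List Int) (B : List (List Int)) (out : List Int) : Prop := out = vec_mat_mul_alt A B
instance (A : List Int) (B : List (List Int)) (out : List Int) : Decidable (Spec_vec_mat_mul A B out) := by unfold Spec_vec_mat_mul; infer_instance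

-- ===== CLAIM (what is proved, stated in full; the proofs are below) =====
def Claim_equal_vec_mat_mul : Prop := ∀ (A : List Int) (B : List (List Int)), Dom_vec_mat_mul A B → Pre_vec_mat_mul A B → Spec_vec_mat_mul A B (vec_mat_mul A B)

-- ===== LEMMAS AND PROOFS =====

-- appending f i for each i of a range builds the map
theorem foldl_append_map {α : Type} (f : Nat → α) :
    ∀ (n : Nat) (acc : List α),
      (List.range n).foldl (fun output i => output ++ [f i]) acc = acc ++ (List.range n).map f := by
  intro n
  induction n with
  | zero => simp
  | succ m ih =>
    intro acc
    simp [List.range_succ, ih]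

theorem getD_map_range {α : Type} (f : Nat → α) (n k : Nat) (d : α) :
    ((List.range n).map f).getD k d = if k < n then f k else d := by
  by_cases h : k < n
  · simp [List.getD, h]
  · simp [List.getD, h]

theorem set_map_range {α : Type} (f : Nat → α) (n k : Nat) (v : α) (_hk : k < n) :
    ((List.range n).map f).set k v = (List.range n).map (fun i => if i = k then v else f i) := by
  apply List.ext_getElem
  · simp
  · intro i h1 h2
    have hi : i < n := by simpa using h2
    by_cases h : k = i
    · simp [h]
    · simp [h]
      intro hik
      exact absurd hik.symm h

-- the inner SAXPY loop, run on a range-map vector, updates it pointwise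
theorem saxpy_aux (a : Int) (row : List Int) (g : Nat → Int) (n : Nat) :
    ∀ (k : Nat), k ≤ n →
      (List.range k).foldl (fun o i => o.set i (o.getD i 0 + a * row.getD i 0))
          ((List.range n).map g)
        = (List.range n).map (fun i => if i < k then g i + a * row.getD i 0 else g i) := by
  intro k
  induction k with
  | zero => simp
  | succ m ih =>
    intro hk
    have hm : m ≤ n := Nat.le_of_succ_le hk
    have hmn : m < n := hk
    rw [List.range_succ, List.foldl_append, ih hm]
    simp only [List.foldl_cons, List.foldl_nil]
    rw [getD_map_range, set_map_range _ _ _ _ hmn]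
    apply List.map_congr_left
    intro i hi
    by_cases h1 : i = m
    · simp [h1, hmn]
    · have : i < m + 1 ↔ i < m := by omega
      simp [h1, this]

theorem saxpy_map (a : Int) (row : List Int) (g : Nat → Int) (n : Nat) :
    (List.range ((List.range n).map g).length).foldl
        (fun o i => o.set i (o.getD i 0 + a * row.getD i 0)) ((List.range n).map g)
      = (List.range n).map (fun i => g i + a * row.getD i 0) := by
  rw [List.length_map, List.length_range, saxpy_aux a row g n n le_rfl]
  apply List.map_congr_left
  intro i hi
  simp [List.mem_range.mp hi]

-- the row loop of B accumulates, per output index, a running sum over the rows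
theorem saxpy_rows (n : Nat) :
    ∀ (L : List (Int × List Int)) (g : Nat → Int),
      L.foldl
          (fun output p =>
            (List.range output.length).foldl
              (fun o i => o.set i (o.getD i 0 + p.1 * p.2.getD i 0)) output)
          ((List.range n).map g)
        = (List.range n).map (fun i => L.foldl (fun s p => s + p.1 * p.2.getD i 0) (g i)) := by
  intro L
  induction L with
  | nil => simp
  | cons p L ih =>
    intro g
    simp only [List.foldl_cons]
    rw [saxpy_map p.1 p.2 g n, ih]

-- A's per-column dot product equals B's per-row accumulation at that column
theorem dot_eq :
    ∀ (A : List Int) (Bs : List (List Int)), A.length ≤ Bs.length → ∀ (i : Nat) (s0 : Int),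
      (List.range A.length).foldl (fun s j => s + A.getD j 0 * (Bs.getD j []).getD i 0) s0
        = (A.zip Bs).foldl (fun s p => s + p.1 * p.2.getD i 0) s0 := by
  intro A
  induction A with
  | nil => simp
  | cons a A ih =>
    intro Bs hlen i s0
    match Bs with
    | [] => simp at hlen
    | b :: Bs =>
      simp only [List.length_cons, List.range_succ_eq_map, List.foldl_cons, List.foldl_map,
        List.zip_cons_cons]
      exact ih Bs (by simpa using hlen) i (s0 + a * b.getD i 0)

theorem replicate_eq_map_range (n : Nat) :
    (List.replicate n (0 : Int)) = (List.range n).map (fun _ => 0) := by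
  simp [List.map_const']

-- ===== VERDICT (by name: the statement is the Claim_ definition above) =====
theorem vec_mat_mul_spec : Claim_equal_vec_mat_mul := by
  intro A B _ hpre
  unfold Spec_vec_mat_mul vec_mat_mul vec_mat_mul_alt
  rw [foldl_append_map, List.nil_append, replicate_eq_map_range, saxpy_rows]
  rcases hpre with ⟨hB, hcase⟩
  rcases hcase with h0 | ⟨hlen, _⟩
  · rw [h0]
    simp
  · apply List.map_congr_left
    intro i _
    exact dot_eq A B hlen i 0
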